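-- pv_equiv track=rewrite | github.com/Patrick-Small/CS_470_smallp | A04.py | getOneLBPLabel
-- ===== SOURCE A (Python) =====
-- def getOneLBPLabel (subImage, label_type):
--
--     #Local declarations
--     flat = []
--     LBP_binary = []
--     LBP_label = 0
--     switchCount = 0
--
--     #Fill a 1 dimensional array with each value (regular order, so 1 - 9)
--     for row in subImage:
--
--         for pixel_value in row:
--
--             flat.append (pixel_value)
--
--     #Get the center
--     center = flat[4]
--
--     #Go clockwise from the upper left pixel and store in NEW array (1, 2, 3, 6, 9, 8, 7, 4)
--     neighbors = [flat[0], flat[1], flat[2], flat[5], flat[8], flat[7], flat[6], flat[3]]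
--
--     #Use thresholding to calculate the LBP labels in binary
--     for pixel_value in neighbors:
--
--         if pixel_value > center:
--
--             LBP_binary.append (1)
--
--         else:
--
--             LBP_binary.append (0)
--
--     #Loop through LBP_binary
--     for i in range(len(LBP_binary) - 1):
--
--         #Checks if next element changes
--         if LBP_binary[i] != LBP_binary[i+1]:
--
--             switchCount += 1
--
--         #Counts the number of 1's
--         if LBP_binary[i] == 1:
--
--             LBP_label += 1
--
--     #Check the last element separately to avoid index out of range error
--     if len(LBP_binary) > 0 and LBP_binary[-1] == 1:
--
--         LBP_label += 1
--
--     #If it's not uniform, then it's labeled as 9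
--     if switchCount > 2:
--
--         LBP_label = 9
--
--     """ OLD CODE [This calculates full LBP, need to calculate uniform]
--     #So it goes from lowest to highest value
--     LBP_binary.reverse ()
--
--     #You have a list of binary values, but you should turn it into a decimal value (256 possible labels)
--     for i in range (len(LBP_binary)):
--
--         LBP_label += LBP_binary[i] * (2 ** i)
--     """
--
--     #Return the decimal label
--     return LBP_label
-- ===== SOURCE B (Python) =====
-- def getOneLBPLabel(subImage, label_type):
--     # Bit-packed uniform-LBP: fold the 8 threshold bits into one integer and
--     # count ones / adjacent transitions with bin().count('1').
--     flat = [p for row in subImage for p in row]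
--     c = flat[4]
--     v = 0
--     for i, j in enumerate((0, 1, 2, 5, 8, 7, 6, 3)):
--         if flat[j] > c:
--             v |= 1 << i
--     switches = bin((v ^ (v >> 1)) & 0x7F).count('1')
--     return 9 if switches > 2 else bin(v).count('1')
-- ===== Notes on version B (the rewrite author's own statement) =====
-- stated objective: alternative
-- what changed: Replaces the explicit binary list plus two counting loops by packing the 8 threshold bits into one integer and computing ones/transitions via bin(v).count('1') and a masked XOR with the shifted value.
import Mathlib
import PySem

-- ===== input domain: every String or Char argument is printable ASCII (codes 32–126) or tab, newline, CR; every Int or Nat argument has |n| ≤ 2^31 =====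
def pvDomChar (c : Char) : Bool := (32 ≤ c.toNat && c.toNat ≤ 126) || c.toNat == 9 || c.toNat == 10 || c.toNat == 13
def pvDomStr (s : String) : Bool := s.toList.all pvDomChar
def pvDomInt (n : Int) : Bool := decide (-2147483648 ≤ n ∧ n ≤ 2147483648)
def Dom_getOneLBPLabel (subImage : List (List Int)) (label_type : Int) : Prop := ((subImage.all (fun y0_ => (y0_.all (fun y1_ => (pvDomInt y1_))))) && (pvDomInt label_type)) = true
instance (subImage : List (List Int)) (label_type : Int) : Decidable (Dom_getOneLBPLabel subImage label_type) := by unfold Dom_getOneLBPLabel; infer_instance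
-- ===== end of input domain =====

-- B packs the 8 threshold bits into one integer and counts ones / adjacent transitions
-- arithmetically (popcount of v and of the masked XOR with the shifted v), instead of
-- A's explicit binary list and index loops (objective: alternative, same O(1) cost).

-- ===== PORT A =====
def getOneLBPLabel (subImage : List (List Int)) (label_type : Int) : Int :=
  -- flatten with the two nested loops (append one pixel at a time)
  let flat := subImage.foldl (fun acc row => row.foldl (fun a p => a ++ [p]) acc) ([] : List Int)
  let center := (PySem.List.pyGet? flat 4).getD 0
  let neighbors : List Int :=
    [(PySem.List.pyGet? flat 0).getD 0, (PySem.List.pyGet? flat 1).getD 0,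
     (PySem.List.pyGet? flat 2).getD 0, (PySem.List.pyGet? flat 5).getD 0,
     (PySem.List.pyGet? flat 8).getD 0, (PySem.List.pyGet? flat 7).getD 0,
     (PySem.List.pyGet? flat 6).getD 0, (PySem.List.pyGet? flat 3).getD 0]
  let lbpBinary := neighbors.foldl (fun acc p => acc ++ [if p > center then (1 : Int) else 0]) []
  -- for i in range(len(LBP_binary)-1): count switches and ones
  let st := (PySem.List.pyRange 0 ((lbpBinary.length : Int) - 1) 1).foldl
      (fun (st : Int × Int) i =>
        let sc := if (PySem.List.pyGet? lbpBinary i).getD 0 ≠ (PySem.List.pyGet? lbpBinary (i + 1)).getD 0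
                  then st.1 + 1 else st.1
        let lab := if (PySem.List.pyGet? lbpBinary i).getD 0 = 1 then st.2 + 1 else st.2
        (sc, lab)) ((0 : Int), (0 : Int))
  let lab := if lbpBinary.length > 0 ∧ (PySem.List.pyGet? lbpBinary (-1)).getD 0 = 1 then st.2 + 1 else st.2
  if st.1 > 2 then 9 else lab

-- ===== PORT B =====
def getOneLBPLabel_alt (subImage : List (List Int)) (label_type : Int) : Int :=
  let flat := subImage.flatMap (fun row => row)
  let c := (PySem.List.pyGet? flat 4).getD 0
  let v := (PySem.List.enumerate ([0, 1, 2, 5, 8, 7, 6, 3] : List Int)).foldl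
      (fun (v : Nat) ij =>
        if (PySem.List.pyGet? flat ij.2).getD 0 > c then v ||| (1 <<< ij.1.toNat) else v) 0
  -- bin(x).count('1') ported as counting '1' in the base-2 digit string
  let switches : Int := ((Nat.toDigits 2 ((v ^^^ (v >>> 1)) &&& 0x7F)).count '1' : Nat)
  if switches > 2 then 9 else ((Nat.toDigits 2 v).count '1' : Nat)

-- ===== PRECONDITION & SPEC =====
-- Pre_ excludes exactly the inputs with fewer than 9 pixels in total, on which A
-- raises IndexError at flat[4]/flat[8] (B raises there too).
def Pre_getOneLBPLabel (subImage : List (List Int)) (label_type : Int) : Prop :=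
  9 ≤ (subImage.flatMap (fun row => row)).length
instance (subImage : List (List Int)) (label_type : Int) : Decidable (Pre_getOneLBPLabel subImage label_type) := by
  unfold Pre_getOneLBPLabel; infer_instance
def pvWitness_getOneLBPLabel : List (List Int) × Int := ([[1, 2, 3], [4, 5, 6], [7, 8, 9]], 0)

def Spec_getOneLBPLabel (subImage : List (List Int)) (label_type : Int) (out : Int) : Prop := out = getOneLBPLabel_alt subImage label_type
instance (subImage : List (List Int)) (label_type : Int) (out : Int) : Decidable (Spec_getOneLBPLabel subImage label_type out) := by unfold Spec_getOneLBPLabel; infer_instance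

-- ===== CLAIM (what is proved, stated in full; the proofs are below) =====
def Claim_equal_getOneLBPLabel : Prop := ∀ (subImage : List (List Int)) (label_type : Int), Dom_getOneLBPLabel subImage label_type → Pre_getOneLBPLabel subImage label_type → Spec_getOneLBPLabel subImage label_type (getOneLBPLabel subImage label_type)

-- ===== LEMMAS AND PROOFS =====

theorem pv_flatten_inner (row : List Int) (acc : List Int) :
    row.foldl (fun a p => a ++ [p]) acc = acc ++ row := by
  induction row generalizing acc with
  | nil => simp
  | cons x xs ih => rw [List.foldl_cons, ih]; simp

-- A's nested append loops build exactly the flatten B uses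
theorem pv_flatten_eq (l : List (List Int)) :
    l.foldl (fun acc row => row.foldl (fun a p => a ++ [p]) acc) [] = l.flatMap (fun row => row) := by
  have h : ∀ (l : List (List Int)) (acc : List Int),
      l.foldl (fun acc row => row.foldl (fun a p => a ++ [p]) acc) acc = acc ++ l.flatMap (fun row => row) := by
    intro l
    induction l with
    | nil => intro acc; simp
    | cons r rs ih => intro acc; rw [List.foldl_cons, pv_flatten_inner, ih]; simp
  simpa using h l []

-- ===== VERDICT (by name: the statement is the Claim_ definition above) =====
set_option maxHeartbeats 1000000 in
theorem getOneLBPLabel_spec : Claim_equal_getOneLBPLabel := by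
  intro s lt _hdom hpre
  unfold Spec_getOneLBPLabel
  unfold Pre_getOneLBPLabel at hpre
  unfold getOneLBPLabel getOneLBPLabel_alt
  rw [pv_flatten_eq]
  generalize hf : s.flatMap (fun row => row) = flat at hpre ⊢
  match flat, hpre with
  | a0 :: a1 :: a2 :: a3 :: a4 :: a5 :: a6 :: a7 :: a8 :: rest, _ =>
  have g0 : (PySem.List.pyGet? (a0 :: a1 :: a2 :: a3 :: a4 :: a5 :: a6 :: a7 :: a8 :: rest) 0).getD 0 = a0 := by simp [pysem]
  have g1 : (PySem.List.pyGet? (a0 :: a1 :: a2 :: a3 :: a4 :: a5 :: a6 :: a7 :: a8 :: rest) 1).getD 0 = a1 := by simp [pysem]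
  have g2 : (PySem.List.pyGet? (a0 :: a1 :: a2 :: a3 :: a4 :: a5 :: a6 :: a7 :: a8 :: rest) 2).getD 0 = a2 := by simp [pysem]
  have g3 : (PySem.List.pyGet? (a0 :: a1 :: a2 :: a3 :: a4 :: a5 :: a6 :: a7 :: a8 :: rest) 3).getD 0 = a3 := by simp [pysem]
  have g4 : (PySem.List.pyGet? (a0 :: a1 :: a2 :: a3 :: a4 :: a5 :: a6 :: a7 :: a8 :: rest) 4).getD 0 = a4 := by simp [pysem]
  have g5 : (PySem.List.pyGet? (a0 :: a1 :: a2 :: a3 :: a4 :: a5 :: a6 :: a7 :: a8 :: rest) 5).getD 0 = a5 := by simp [pysem]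
  have g6 : (PySem.List.pyGet? (a0 :: a1 :: a2 :: a3 :: a4 :: a5 :: a6 :: a7 :: a8 :: rest) 6).getD 0 = a6 := by simp [pysem]
  have g7 : (PySem.List.pyGet? (a0 :: a1 :: a2 :: a3 :: a4 :: a5 :: a6 :: a7 :: a8 :: rest) 7).getD 0 = a7 := by simp [pysem]
  have g8 : (PySem.List.pyGet? (a0 :: a1 :: a2 :: a3 :: a4 :: a5 :: a6 :: a7 :: a8 :: rest) 8).getD 0 = a8 := by simp [pysem]
  -- unfold the literal folds, substitute the nine reads, reduce to the 8 threshold bits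
  simp only [PySem.List.enumerate_cons, PySem.List.enumerate_nil, List.foldl_cons,
    List.foldl_nil, List.nil_append, List.cons_append]
  simp only [g0, g1, g2, g3, g4, g5, g6, g7, g8]
  simp only [← Bool.cond_decide]
  generalize decide (a0 > a4) = t0
  generalize decide (a1 > a4) = t1
  generalize decide (a2 > a4) = t2
  generalize decide (a5 > a4) = t3
  generalize decide (a8 > a4) = t4
  generalize decide (a7 > a4) = t5
  generalize decide (a6 > a4) = t6
  generalize decide (a3 > a4) = t7
  revert t0 t1 t2 t3 t4 t5 t6 t7
  decide
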